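-- pv_equiv track=rewrite | github.com/jinzhao3611/cdec-with-decontextualization | src/decontextualization/postprocess.py | add_event_uid
-- ===== SOURCE A (Python) =====
-- def add_event_uid(article: str):
--     event_count = 1
--     article_lst = article.split("\n")
--     new_sents = []
--     for sent in article_lst:
--         tokens = sent.strip().split()
--         for i, token in enumerate(tokens):
--             if token.endswith("_EVENT"):
--                 tokens[i] = f"{token}-{event_count}"
--                 event_count += 1
--         new_sents.append(" ".join(tokens))
--     return "\n".join(new_sents)
-- ===== SOURCE B (Python) =====
-- import re
-- from itertools import count
--
-- _EVENT_TOKEN = re.compile(r'(?:^|(?<= ))(\S*_EVENT)(?= |$)')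
--
--
-- def add_event_uid(article: str):
--     counter = count(1)
--     return "\n".join(
--         _EVENT_TOKEN.sub(lambda m: f"{m.group(1)}-{next(counter)}",
--                          " ".join(line.strip().split()))
--         for line in article.split("\n"))
-- ===== Notes on version B (the rewrite author's own statement) =====
-- stated objective: idiomatic
-- what changed: Replaces the per-line enumerate/index-mutation loop over the token list with a single regex substitution on the whitespace-normalized line, using a callback closing over an itertools.count counter to append the incrementing UID.
import Mathlib
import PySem

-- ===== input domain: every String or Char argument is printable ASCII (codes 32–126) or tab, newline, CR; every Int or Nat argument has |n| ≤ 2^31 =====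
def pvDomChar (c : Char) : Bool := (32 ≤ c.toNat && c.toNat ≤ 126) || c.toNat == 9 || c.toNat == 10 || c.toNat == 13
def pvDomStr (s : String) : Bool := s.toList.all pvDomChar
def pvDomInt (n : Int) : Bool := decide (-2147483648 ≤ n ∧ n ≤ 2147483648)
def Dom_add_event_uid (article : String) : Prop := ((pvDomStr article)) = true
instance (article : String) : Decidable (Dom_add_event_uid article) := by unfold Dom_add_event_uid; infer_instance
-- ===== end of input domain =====

-- B replaces A's per-line index-mutation loop over the token list by a single regex
-- substitution (ported here as an exact left-to-right token-boundary scanner) on the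
-- whitespace-normalized line; objective: idiomatic, same cost.


-- ===== PORT A =====
-- inner loop: 'for i, token in enumerate(tokens): if token.endswith("_EVENT"): tokens[i] = f"{token}-{event_count}"; event_count += 1'
-- (each token rewritten in order, threading event_count)
def tagLoop : List (List Char) → Int → (List (List Char) × Int)
  | [], n => ([], n)
  | t :: ts, n =>
    if PySem.Chars.endswith t "_EVENT".toList then
      let r := tagLoop ts (n + 1)
      ((t ++ '-' :: PySem.Int.toChars n) :: r.1, r.2)
    else
      let r := tagLoop ts n
      (t :: r.1, r.2)

-- outer loop over article.split("\n"), threading event_count and collecting new_sents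
def linesLoopA : List (List Char) → Int → (List (List Char) × Int)
  | [], n => ([], n)
  | s :: ss, n =>
    let tks := tagLoop (PySem.Chars.split₀ (PySem.Chars.strip s)) n
    let r := linesLoopA ss tks.2
    (PySem.Chars.join [' '] tks.1 :: r.1, r.2)

def add_event_uid (article : String) : String :=
  String.ofList (PySem.Chars.join ['\n']
    (linesLoopA (PySem.Chars.splitOn article.toList ['\n']) 1).1)

-- ===== PORT B =====
-- hand port of re.sub(r'(?:^|(?<= ))(\S*_EVENT)(?= |$)', repl, norm) with the counting callback:
-- at a token boundary the greedy '\S*_EVENT' with lookahead '(?= |$)' matches iff the maximal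
-- run of non-space characters ends with "_EVENT", and then it matches exactly that run; the
-- scanner below walks the string left to right reproducing exactly that (exact for this pattern).
def reSub : List Char → Int → Bool → (List Char × Int)
  | [], n, _ => ([], n)
  | c :: rest, n, atStart =>
    if atStart && c != ' ' then
      let run := List.takeWhile (fun x => x ≠ ' ') (c :: rest)
      let rest' := List.dropWhile (fun x => x ≠ ' ') (c :: rest)
      if PySem.Chars.endswith run "_EVENT".toList then
        let r := reSub rest' (n + 1) false
        (run ++ '-' :: PySem.Int.toChars n ++ r.1, r.2)
      else
        let r := reSub rest' n false
        (run ++ r.1, r.2)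
    else
      let r := reSub rest n (c == ' ')
      (c :: r.1, r.2)
  termination_by cs => cs.length
  decreasing_by
    · simp only [List.dropWhile_cons]
      split
      · exact Nat.lt_succ_of_le (List.length_dropWhile_le _ _)
      · simp_all
    · simp only [List.dropWhile_cons]
      split
      · exact Nat.lt_succ_of_le (List.length_dropWhile_le _ _)
      · simp_all
    · simp

-- generator over article.split("\n"): normalize, regex-substitute, thread the counter
def linesLoopB : List (List Char) → Int → (List (List Char) × Int)
  | [], n => ([], n)
  | s :: ss, n =>
    let norm := PySem.Chars.join [' '] (PySem.Chars.split₀ (PySem.Chars.strip s))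
    let o := reSub norm n true
    let r := linesLoopB ss o.2
    (o.1 :: r.1, r.2)

def add_event_uid_alt (article : String) : String :=
  String.ofList (PySem.Chars.join ['\n']
    (linesLoopB (PySem.Chars.splitOn article.toList ['\n']) 1).1)

-- ===== PRECONDITION & SPEC =====
def Spec_add_event_uid (article : String) (out : String) : Prop := out = add_event_uid_alt article
instance (article : String) (out : String) : Decidable (Spec_add_event_uid article out) := by unfold Spec_add_event_uid; infer_instance

-- ===== CLAIM (what is proved, stated in full; the proofs are below) =====
def Claim_equal_add_event_uid : Prop := ∀ (article : String), Dom_add_event_uid article → Spec_add_event_uid article (add_event_uid article)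

-- ===== LEMMAS AND PROOFS =====

lemma split₀_go_tokens (s : List Char) : ∀ (cur : List Char) (acc : List (List Char)),
    (∀ c ∈ cur, PySem.Chars.isspace c = false) →
    (∀ w ∈ acc, w ≠ [] ∧ ∀ c ∈ w, PySem.Chars.isspace c = false) →
    ∀ w ∈ PySem.Chars.split₀.go s cur acc, w ≠ [] ∧ ∀ c ∈ w, PySem.Chars.isspace c = false := by
  induction s with
  | nil =>
    intro cur acc hcur hacc w hw
    simp only [PySem.Chars.split₀.go] at hw
    split at hw
    · simp only [List.mem_reverse] at hw; exact hacc w hw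
    · rename_i hne
      simp only [List.mem_reverse, List.mem_cons] at hw
      rcases hw with h | h
      · subst h
        constructor
        · simp only [ne_eq, List.reverse_eq_nil_iff]
          intro hc; simp [hc] at hne
        · intro c hc; exact hcur c (List.mem_reverse.mp hc)
      · exact hacc w h
  | cons c rest ih =>
    intro cur acc hcur hacc w hw
    simp only [PySem.Chars.split₀.go] at hw
    split at hw
    · split at hw
      · exact ih [] acc (by simp) hacc w hw
      · rename_i hsp hne
        refine ih [] (cur.reverse :: acc) (by simp) ?_ w hw
        intro v hv
        rcases List.mem_cons.mp hv with h | h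
        · subst h
          exact ⟨by simpa [List.reverse_eq_nil_iff] using fun hc => hne (by simp [hc]),
                 fun d hd => hcur d (List.mem_reverse.mp hd)⟩
        · exact hacc v h
    · rename_i hsp
      refine ih (c :: cur) acc ?_ hacc w hw
      intro d hd
      rcases List.mem_cons.mp hd with h | h
      · subst h; simpa using hsp
      · exact hcur d h

lemma split₀_tokens (s : List Char) :
    ∀ w ∈ PySem.Chars.split₀ s, w ≠ [] ∧ ∀ c ∈ w, PySem.Chars.isspace c = false := by
  exact split₀_go_tokens s [] [] (by simp) (by simp)

lemma tagLoop_fst_cons (v : List Char) (vs : List (List Char)) (m : Int) :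
    ∃ t ts, (tagLoop (v :: vs) m).1 = t :: ts := by
  simp only [tagLoop]
  split <;> exact ⟨_, _, rfl⟩


lemma reSub_join (ws : List (List Char)) (n : Int)
    (h : ∀ w ∈ ws, w ≠ [] ∧ ∀ c ∈ w, c ≠ ' ') :
    reSub (PySem.Chars.join [' '] ws) n true =
      ((PySem.Chars.join [' '] (tagLoop ws n).1), (tagLoop ws n).2) := by
  induction ws generalizing n with
  | nil => simp [PySem.Chars.join, List.intercalate, reSub, tagLoop]
  | cons w ws ih =>
    obtain ⟨hne, hsp⟩ := h w (List.mem_cons_self ..)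
    obtain ⟨c, cs, rfl⟩ : ∃ c cs, w = c :: cs := by
      cases w with
      | nil => exact absurd rfl hne
      | cons c cs => exact ⟨c, cs, rfl⟩
    have hc : c ≠ ' ' := hsp c (List.mem_cons_self ..)
    have hall : ∀ x ∈ c :: cs, (fun x => decide (x ≠ ' ')) x = true := by
      intro x hx; simpa using hsp x hx
    have hcond : (true && c != ' ') = true := by simp [hc]
    cases ws with
    | nil =>
      have hj : PySem.Chars.join [' '] [c :: cs] = c :: cs := by
        simp [PySem.Chars.join, List.intercalate]
      rw [hj, reSub, if_pos hcond]
      have htw : List.takeWhile (fun x => decide (x ≠ ' ')) (c :: cs) = c :: cs := by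
        simpa using List.takeWhile_append_of_pos (l₂ := []) hall
      have hdw : List.dropWhile (fun x => decide (x ≠ ' ')) (c :: cs) = [] := by
        simpa using List.dropWhile_append_of_pos (l₂ := []) hall
      rw [htw, hdw]
      by_cases hev : PySem.Chars.endswith (c :: cs) ['_', 'E', 'V', 'E', 'N', 'T'] = true
      · simp [hev, tagLoop, reSub, PySem.Chars.join, List.intercalate]
      · simp [hev, tagLoop, reSub, PySem.Chars.join, List.intercalate]
    | cons v vs =>
      have hj : PySem.Chars.join [' '] ((c :: cs) :: v :: vs)
          = c :: (cs ++ ' ' :: PySem.Chars.join [' '] (v :: vs)) := by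
        simp [PySem.Chars.join, List.intercalate, List.intersperse]
      rw [hj, reSub, if_pos hcond]
      have htw : List.takeWhile (fun x => decide (x ≠ ' '))
          (c :: (cs ++ ' ' :: PySem.Chars.join [' '] (v :: vs))) = c :: cs := by
        have := List.takeWhile_append_of_pos (l₂ := ' ' :: PySem.Chars.join [' '] (v :: vs)) hall
        rw [List.cons_append] at this
        rw [this]
        simp
      have hdw : List.dropWhile (fun x => decide (x ≠ ' '))
          (c :: (cs ++ ' ' :: PySem.Chars.join [' '] (v :: vs)))
          = ' ' :: PySem.Chars.join [' '] (v :: vs) := by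
        have := List.dropWhile_append_of_pos (l₂ := ' ' :: PySem.Chars.join [' '] (v :: vs)) hall
        rw [List.cons_append] at this
        rw [this]
        simp
      rw [htw, hdw]
      have hih : ∀ m : Int, reSub (' ' :: PySem.Chars.join [' '] (v :: vs)) m false =
          ((' ' :: PySem.Chars.join [' '] ((tagLoop (v :: vs) m).1)), (tagLoop (v :: vs) m).2) := by
        intro m
        rw [reSub]
        have : (false && ' ' != ' ') = true ↔ False := by simp
        rw [if_neg (by simp)]
        have := ih m (fun w hw => h w (List.mem_cons_of_mem _ hw))
        simp [this]
      have hstr : "_EVENT".toList = ['_', 'E', 'V', 'E', 'N', 'T'] := rfl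
      simp only [hstr]
      by_cases hev : PySem.Chars.endswith (c :: cs) ['_', 'E', 'V', 'E', 'N', 'T'] = true
      · have hT : tagLoop ((c :: cs) :: v :: vs) n
            = (((c :: cs) ++ '-' :: PySem.Int.toChars n) :: (tagLoop (v :: vs) (n + 1)).1,
               (tagLoop (v :: vs) (n + 1)).2) := by
          conv_lhs => rw [tagLoop]
          simp only [hstr]
          rw [if_pos hev]
        obtain ⟨t, ts, hts⟩ := tagLoop_fst_cons v vs (n + 1)
        rw [if_pos hev, hih (n + 1), hT, hts]
        simp [PySem.Chars.join, List.intercalate, List.intersperse]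
      · have hT : tagLoop ((c :: cs) :: v :: vs) n
            = ((c :: cs) :: (tagLoop (v :: vs) n).1, (tagLoop (v :: vs) n).2) := by
          conv_lhs => rw [tagLoop]
          simp only [hstr]
          rw [if_neg hev]
        obtain ⟨t, ts, hts⟩ := tagLoop_fst_cons v vs n
        rw [if_neg hev, hih n, hT, hts]
        simp [PySem.Chars.join, List.intercalate, List.intersperse]

lemma linesLoop_eq (ls : List (List Char)) (n : Int) :
    linesLoopB ls n = linesLoopA ls n := by
  induction ls generalizing n with
  | nil => rfl
  | cons s ss ih =>
    have htok : ∀ w ∈ PySem.Chars.split₀ (PySem.Chars.strip s), w ≠ [] ∧ ∀ c ∈ w, c ≠ ' ' := by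
      intro w hw
      obtain ⟨h1, h2⟩ := split₀_tokens _ w hw
      refine ⟨h1, fun c hc hsp => ?_⟩
      subst hsp
      have := h2 _ hc
      rw [show PySem.Chars.isspace ' ' = true from rfl] at this
      exact absurd this (by simp)
    simp only [linesLoopB, linesLoopA, reSub_join _ _ htok, ih]

-- ===== VERDICT (by name: the statement is the Claim_ definition above) =====
theorem add_event_uid_spec : Claim_equal_add_event_uid := by
  intro article _
  unfold Spec_add_event_uid add_event_uid add_event_uid_alt
  rw [linesLoop_eq]
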